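-- pv_equiv track=rewrite | github.com/zhengxueqian01/Edit-Verify-Reason | src/chart_agent/perception/line_svg_updater.py | _resolve_matching_label
-- ===== SOURCE A (Python) =====
-- def _normalize_label_token(value: str) -> str:
--     text = str(value or "").strip().lower()
--     return text[1:] if text.startswith("@") else text
--
-- def _labels_match(left: str, right: str) -> bool:
--     left_text = str(left or "").strip()
--     right_text = str(right or "").strip()
--     if not left_text or not right_text:
--         return False
--     if left_text.lower() == right_text.lower():
--         return True
--     return _normalize_label_token(left_text) == _normalize_label_token(right_text)
--
-- def _resolve_matching_label(candidate: str, labels: list[str]) -> str | None: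
--     text = str(candidate or "").strip()
--     if not text:
--         return None
--     for label in labels:
--         if str(label or "").strip().lower() == text.lower():
--             return label
--     for label in labels:
--         if _labels_match(text, label):
--             return label
--     return None
-- ===== SOURCE B (Python) =====
-- def _normalize_label_token(value: str) -> str:
--     text = str(value or "").strip().lower()
--     return text[1:] if text.startswith("@") else text
--
-- def _labels_match(left: str, right: str) -> bool:
--     left_text = str(left or "").strip()
--     right_text = str(right or "").strip()
--     if not left_text or not right_text:
--         return False
--     if left_text.lower() == right_text.lower():
--         return True
--     return _normalize_label_token(left_text) == _normalize_label_token(right_text)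
--
-- def _resolve_matching_label(candidate: str, labels: list[str]) -> str | None:
--     text = str(candidate or "").strip()
--     if not text:
--         return None
--     fallback = None
--     for label in labels:
--         if str(label or "").strip().lower() == text.lower():
--             return label
--         if fallback is None and _labels_match(text, label):
--             fallback = label
--     return fallback
-- ===== Notes on version B (the rewrite author's own statement) =====
-- stated objective: alternative
-- what changed: Replaces A's two separate scans of labels (exact pass, then normalized pass) with a single pass that returns an exact match immediately and carries the first normalized match as a never-overwritten fallback accumulator.
import Mathlib
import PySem

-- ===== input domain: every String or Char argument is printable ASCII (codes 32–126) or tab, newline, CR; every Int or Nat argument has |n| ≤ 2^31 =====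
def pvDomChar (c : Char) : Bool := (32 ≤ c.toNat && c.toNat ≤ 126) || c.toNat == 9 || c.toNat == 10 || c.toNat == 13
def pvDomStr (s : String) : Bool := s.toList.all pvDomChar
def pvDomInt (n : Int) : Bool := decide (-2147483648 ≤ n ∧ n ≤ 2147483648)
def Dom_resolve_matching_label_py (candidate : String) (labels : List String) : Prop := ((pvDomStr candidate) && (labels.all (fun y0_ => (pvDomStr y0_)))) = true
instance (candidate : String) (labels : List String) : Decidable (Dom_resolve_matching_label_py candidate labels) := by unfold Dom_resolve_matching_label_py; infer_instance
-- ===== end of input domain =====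

-- B = single pass over labels with a fallback accumulator instead of A's two separate scans (alternative decomposition, same cost).

-- ===== PORT A =====
def normalizeLabelToken (value : String) : String :=
  let text := PySem.Str.lower (PySem.Str.strip value)
  if PySem.Str.startswith text "@" then PySem.Str.slice text (some 1) none else text

def labelsMatch (left right : String) : Bool :=
  let left_text := PySem.Str.strip left
  let right_text := PySem.Str.strip right
  if left_text = "" || right_text = "" then false
  else if PySem.Str.lower left_text = PySem.Str.lower right_text then true
  else decide (normalizeLabelToken left_text = normalizeLabelToken right_text)

def resolve_matching_label_py (candidate : String) (labels : List String) : Option String :=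
  let text := PySem.Str.strip candidate
  if text = "" then none
  else
    -- first loop: exact (case-insensitive) match, early return
    match labels.find? (fun label => PySem.Str.lower (PySem.Str.strip label) = PySem.Str.lower text) with
    | some label => some label
    | none =>
      -- second loop: normalized match
      labels.find? (fun label => labelsMatch text label)

-- ===== PORT B =====
def normalizeLabelTokenB (value : String) : String :=
  let text := PySem.Str.lower (PySem.Str.strip value)
  if PySem.Str.startswith text "@" then PySem.Str.slice text (some 1) none else text

def labelsMatchB (left right : String) : Bool :=
  let left_text := PySem.Str.strip left
  let right_text := PySem.Str.strip right
  if left_text = "" || right_text = "" then false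
  else if PySem.Str.lower left_text = PySem.Str.lower right_text then true
  else decide (normalizeLabelTokenB left_text = normalizeLabelTokenB right_text)

-- the single for-loop of B: early return on exact match, fallback accumulator otherwise
def resolveLoopB (text : String) : List String → Option String → Option String
  | [], fallback => fallback
  | label :: rest, fallback =>
    if PySem.Str.lower (PySem.Str.strip label) = PySem.Str.lower text then some label
    else resolveLoopB text rest
      (if fallback.isNone && labelsMatchB text label then some label else fallback)

def resolve_matching_label_py_alt (candidate : String) (labels : List String) : Option String :=
  let text := PySem.Str.strip candidate
  if text = "" then none
  else resolveLoopB text labels none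

-- ===== PRECONDITION & SPEC =====
def Spec_resolve_matching_label_py (candidate : String) (labels : List String) (out : Option String) : Prop := out = resolve_matching_label_py_alt candidate labels
instance (candidate : String) (labels : List String) (out : Option String) : Decidable (Spec_resolve_matching_label_py candidate labels out) := by unfold Spec_resolve_matching_label_py; infer_instance

-- ===== CLAIM (what is proved, stated in full; the proofs are below) =====
def Claim_equal_resolve_matching_label_py : Prop := ∀ (candidate : String) (labels : List String), Dom_resolve_matching_label_py candidate labels → Spec_resolve_matching_label_py candidate labels (resolve_matching_label_py candidate labels)

-- ===== LEMMAS AND PROOFS =====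

theorem labelsMatchB_eq (l r : String) : labelsMatchB l r = labelsMatch l r := by
  simp [labelsMatch, labelsMatchB, normalizeLabelToken, normalizeLabelTokenB]

-- B's loop characterised by A's two scans, for any fallback accumulator value
theorem resolveLoopB_eq (text : String) (ls : List String) (fb : Option String) :
    resolveLoopB text ls fb =
      match ls.find? (fun label => PySem.Str.lower (PySem.Str.strip label) = PySem.Str.lower text) with
      | some label => some label
      | none => fb.orElse (fun _ => ls.find? (fun label => labelsMatchB text label)) := by
  induction ls generalizing fb with
  | nil => cases fb <;> simp [resolveLoopB, Option.orElse]
  | cons l rest ih =>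
    by_cases hx : PySem.Str.lower (PySem.Str.strip l) = PySem.Str.lower text
    · simp [resolveLoopB, hx, List.find?]
    · have hx' : (decide (PySem.Str.lower (PySem.Str.strip l) = PySem.Str.lower text)) = false := by
        simp [hx]
      cases fb with
      | some v => simp [resolveLoopB, hx, List.find?, hx', ih, Option.orElse]
      | none =>
        by_cases hm : labelsMatchB text l
        · simp [resolveLoopB, hx, List.find?, hm, ih, Option.orElse]
        · simp [resolveLoopB, hx, List.find?, hm, ih, Option.orElse]

-- ===== VERDICT (by name: the statement is the Claim_ definition above) =====
theorem resolve_matching_label_py_spec : Claim_equal_resolve_matching_label_py := by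
  intro candidate labels _
  unfold Spec_resolve_matching_label_py resolve_matching_label_py resolve_matching_label_py_alt
  by_cases h : PySem.Str.strip candidate = ""
  · simp [h]
  · simp only [h, if_false, resolveLoopB_eq, Option.orElse]
    have : (fun label => labelsMatchB (PySem.Str.strip candidate) label)
         = (fun label => labelsMatch (PySem.Str.strip candidate) label) := by
      funext l; exact labelsMatchB_eq _ _
    rw [this]
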